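-- pv_equiv track=rewrite | github.com/brooke-hansen/hello | week6practice/output_odd.py | output_odd
-- ===== SOURCE A (Python) =====
-- def output_odd(lowernum, uppernum):
--     numlist = []
--     oddnum = ''
--     for number in range(lowernum, uppernum +1):
--         if number % 2 == 1:
--             oddnum = number
--             numlist.append(oddnum)
--             oddnum = ''
--     return numlist
-- ===== SOURCE B (Python) =====
-- def output_odd(lowernum, uppernum):
--     start = lowernum if lowernum % 2 != 0 else lowernum + 1
--     return list(range(start, uppernum + 1, 2))
-- ===== Notes on version B (the rewrite author's own statement) =====
-- stated objective: faster
-- what changed: B computes the first odd value arithmetically and strides range(start, uppernum+1, 2) directly over the odd numbers, removing the per-element parity branch and the oddnum temporary of A's filter loop.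
import Mathlib
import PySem

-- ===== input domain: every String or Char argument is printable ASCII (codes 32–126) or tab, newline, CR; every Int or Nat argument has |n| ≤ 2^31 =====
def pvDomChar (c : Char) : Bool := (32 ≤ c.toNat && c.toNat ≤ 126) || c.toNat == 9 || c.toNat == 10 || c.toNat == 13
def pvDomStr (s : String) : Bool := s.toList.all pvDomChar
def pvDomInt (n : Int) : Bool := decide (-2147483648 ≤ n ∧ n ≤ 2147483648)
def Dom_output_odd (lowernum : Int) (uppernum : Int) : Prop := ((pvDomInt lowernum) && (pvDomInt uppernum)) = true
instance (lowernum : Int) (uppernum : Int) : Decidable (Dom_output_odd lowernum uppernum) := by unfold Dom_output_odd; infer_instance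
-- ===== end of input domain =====

-- B computes the first odd value arithmetically and strides by 2 over only the odd numbers,
-- instead of scanning the whole range and filtering by parity (objective: faster, constant factor).


-- ===== PORT A =====
-- oddnum alternates between '' and an int in Python; ported as Option Int (none = ''), exact for the
-- returned list since only appended ints reach numlist.
def output_odd (lowernum : Int) (uppernum : Int) : List Int :=
  let st := (PySem.List.pyRange lowernum (uppernum + 1) 1).foldl
    (fun (st : List Int × Option Int) number =>
      if PySem.Int.mod number 2 == 1 then
        let oddnum : Option Int := some number
        let numlist := st.1 ++ [number]
        (numlist, (none : Option Int))
      else st) (([] : List Int), (none : Option Int))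
  st.1

-- ===== PORT B =====
def output_odd_alt (lowernum : Int) (uppernum : Int) : List Int :=
  let start := if PySem.Int.mod lowernum 2 != 0 then lowernum else lowernum + 1
  PySem.List.pyRange start (uppernum + 1) 2

-- ===== PRECONDITION & SPEC =====
def Spec_output_odd (lowernum : Int) (uppernum : Int) (out : List Int) : Prop := out = output_odd_alt lowernum uppernum
instance (lowernum : Int) (uppernum : Int) (out : List Int) : Decidable (Spec_output_odd lowernum uppernum out) := by unfold Spec_output_odd; infer_instance

-- ===== CLAIM (what is proved, stated in full; the proofs are below) =====
def Claim_equal_output_odd : Prop := ∀ (lowernum : Int) (uppernum : Int), Dom_output_odd lowernum uppernum → Spec_output_odd lowernum uppernum (output_odd lowernum uppernum)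

-- ===== LEMMAS AND PROOFS =====

-- fst of A's pair-state fold ignores the oddnum component
theorem fst_fold_pair (xs : List Int) (acc : List Int × Option Int) :
    (xs.foldl (fun (st : List Int × Option Int) number =>
      if PySem.Int.mod number 2 == 1 then (st.1 ++ [number], (none : Option Int)) else st) acc).1
    = xs.foldl (fun (l : List Int) number =>
      if PySem.Int.mod number 2 == 1 then l ++ [number] else l) acc.1 := by
  induction xs generalizing acc with
  | nil => rfl
  | cons x xs ih =>
    cases h : PySem.Int.mod x 2 == 1 <;>
      simp only [List.foldl_cons, h, Bool.false_eq_true, if_false, if_true] <;> rw [ih]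

-- cons form of a step-2 range
theorem pyRange_two_cons (a b : Int) (h : a < b) :
    PySem.List.pyRange a b 2 = a :: PySem.List.pyRange (a + 2) b 2 := by
  rw [PySem.List.pyRange_of_pos a b (by norm_num : (0:Int) < 2),
      PySem.List.pyRange_of_pos (a + 2) b (by norm_num : (0:Int) < 2)]
  by_cases h2 : a + 2 < b
  · have hn : (if a < b then ((b - a + 2 - 1) / 2).toNat else 0)
        = (if a + 2 < b then ((b - (a + 2) + 2 - 1) / 2).toNat else 0) + 1 := by
      simp only [if_pos h, if_pos h2]; omega
    rw [hn, List.range_succ_eq_map]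
    simp only [List.map_cons, Nat.cast_zero, mul_zero, add_zero, List.map_map]
    congr 1
    apply List.map_congr_left
    intro k _
    simp only [Function.comp_apply]
    push_cast
    ring
  · have hn : (if a < b then ((b - a + 2 - 1) / 2).toNat else 0) = 1 := by
      simp only [if_pos h]; omega
    have hn2 : (if a + 2 < b then ((b - (a + 2) + 2 - 1) / 2).toNat else 0) = 0 := by
      simp [h2]
    rw [hn, hn2]
    simp

theorem pyRange_two_nil (a b : Int) (h : b ≤ a) : PySem.List.pyRange a b 2 = [] := by
  rw [PySem.List.pyRange_of_pos a b (by norm_num : (0:Int) < 2)]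
  have : ¬ a < b := by omega
  simp [this]

-- the key lemma: filtering the odds out of a unit-step range is the step-2 range from the first odd
theorem filter_odd_eq_stride (l u : Int) :
    (PySem.List.pyRange l u 1).filter (fun n => PySem.Int.mod n 2 == 1)
    = PySem.List.pyRange (if PySem.Int.mod l 2 != 0 then l else l + 1) u 2 := by
  by_cases h : l < u
  · have hk : (u - l).toNat ≠ 0 := by omega
    induction hn : (u - l).toNat generalizing l with
    | zero => omega
    | succ n ih =>
      rw [PySem.List.pyRange_one_cons h, List.filter_cons]
      have hmod2 := PySem.Int.mod_two_eq l
      have hml : PySem.Int.mod l 2 = l % 2 := PySem.Int.mod_eq_emod_of_pos (by norm_num)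
      have hml1 : PySem.Int.mod (l + 1) 2 = (l + 1) % 2 := PySem.Int.mod_eq_emod_of_pos (by norm_num)
      by_cases hlu1 : l + 1 < u
      · have ihr := ih (l + 1) hlu1 (by omega) (by omega)
        rcases hmod2 with he | ho
        · -- l even: skip l, start is l+1 which is odd
          have h1 : PySem.Int.mod (l + 1) 2 = 1 := by rw [hml1]; rw [hml] at he; omega
          rw [show (PySem.Int.mod l 2 == 1) = false by rw [he]; decide]
          rw [show (if PySem.Int.mod l 2 != 0 then l else l + 1) = l + 1 by rw [he]; norm_num]
          simp only [Bool.false_eq_true, if_false]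
          rw [ihr, show (if PySem.Int.mod (l + 1) 2 != 0 then l + 1 else l + 1 + 1) = l + 1 by
            rw [h1]; norm_num]
        · -- l odd: keep l, continue from l+2
          have h0 : PySem.Int.mod (l + 1) 2 = 0 := by rw [hml1]; rw [hml] at ho; omega
          rw [show (PySem.Int.mod l 2 == 1) = true by rw [ho]; decide]
          rw [show (if PySem.Int.mod l 2 != 0 then l else l + 1) = l by rw [ho]; norm_num]
          simp only [if_true]
          rw [ihr, show (if PySem.Int.mod (l + 1) 2 != 0 then l + 1 else l + 1 + 1) = l + 2 by
            rw [h0]; norm_num; ring]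
          rw [pyRange_two_cons l u h]
      · -- l is the last element of the range
        have hnil : PySem.List.pyRange (l + 1) u 1 = [] := PySem.List.pyRange_one_eq_nil (by omega)
        rw [hnil]
        rcases hmod2 with he | ho
        · rw [show (PySem.Int.mod l 2 == 1) = false by rw [he]; decide]
          rw [show (if PySem.Int.mod l 2 != 0 then l else l + 1) = l + 1 by rw [he]; norm_num]
          simp only [Bool.false_eq_true, if_false, List.filter_nil]
          rw [pyRange_two_nil (l + 1) u (by omega)]
        · rw [show (PySem.Int.mod l 2 == 1) = true by rw [ho]; decide]
          rw [show (if PySem.Int.mod l 2 != 0 then l else l + 1) = l by rw [ho]; norm_num]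
          simp only [if_true, List.filter_nil]
          rw [pyRange_two_cons l u h, pyRange_two_nil (l + 2) u (by omega)]
  · rw [PySem.List.pyRange_one_eq_nil (by omega)]
    have hs : u ≤ (if PySem.Int.mod l 2 != 0 then l else l + 1) := by
      split <;> omega
    rw [pyRange_two_nil _ u hs]
    simp

-- ===== VERDICT (by name: the statement is the Claim_ definition above) =====
theorem output_odd_spec : Claim_equal_output_odd := by
  intro l u _
  show output_odd l u = output_odd_alt l u
  unfold output_odd output_odd_alt
  simp only []
  rw [fst_fold_pair]
  rw [show (fun (acc : List Int) number =>
        if PySem.Int.mod number 2 == 1 then acc ++ [number] else acc)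
      = (fun (acc : List Int) number =>
        if (fun n => PySem.Int.mod n 2 == 1) number then acc ++ [id number] else acc) by rfl]
  rw [PySem.List.foldl_append_if]
  rw [List.map_id, List.nil_append]
  exact filter_odd_eq_stride l (u + 1)
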